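-- pv_equiv track=rewrite | github.com/pintti/cybsec_repo | Encryption/slice_an_basis.py | count_together
-- ===== SOURCE A (Python) =====
-- def count_together(lista, a_length, k):
--     number_list = []
--     for numbers in lista:
--         number = 0
--         add = 0
--         p = k - 1
--         for i in range(k):
--             add = int(numbers[i*2]) * 10
--             add += int(numbers[i*2+1])
--             number += add * a_length**p
--             p -= 1
--         number_list.append(number)
--     return number_list
-- ===== SOURCE B (Python) =====
-- def _horner(s, a_length, k):
--     number = 0
--     for i in range(k):
--         number = number * a_length + int(s[2 * i]) * 10 + int(s[2 * i + 1])
--     return number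
--
--
-- def count_together(lista, a_length, k):
--     return [_horner(s, a_length, k) for s in lista]
-- ===== Notes on version B (the rewrite author's own statement) =====
-- stated objective: simpler
-- what changed: Replaces the exponent-accumulator arithmetic (number += pair * a_length**p with a decreasing p) by Horner's rule (number = number * a_length + pair), dropping the p counter and all ** computations, and builds the result as a comprehension over a helper instead of an append loop.
import Mathlib
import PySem

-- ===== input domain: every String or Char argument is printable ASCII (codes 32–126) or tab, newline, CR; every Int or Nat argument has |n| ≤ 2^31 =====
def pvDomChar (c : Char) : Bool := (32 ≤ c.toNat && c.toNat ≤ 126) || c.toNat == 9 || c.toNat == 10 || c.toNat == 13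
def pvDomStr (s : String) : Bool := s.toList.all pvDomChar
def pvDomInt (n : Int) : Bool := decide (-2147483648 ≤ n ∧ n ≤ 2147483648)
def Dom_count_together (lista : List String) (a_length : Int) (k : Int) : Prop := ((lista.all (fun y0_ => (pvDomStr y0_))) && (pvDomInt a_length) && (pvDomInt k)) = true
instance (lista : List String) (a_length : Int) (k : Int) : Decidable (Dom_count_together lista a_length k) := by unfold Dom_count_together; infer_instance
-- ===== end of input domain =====

-- B replaces A's exponent accumulator (pair * a_length**p, p decreasing) by Horner's rule
-- and builds the output by a comprehension over a helper; return values proved equal on Pre_.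

-- ===== PORT A =====
-- int(numbers[j]) for a single character: exact where the index is in range and the char
-- is a decimal digit (guaranteed by Pre_); the defaults are never reached under Pre_.
def pyIntAt (s : String) (j : Int) : Int :=
  match PySem.Str.pyGet? s j with
  | some c => (PySem.Int.ofChars? [c]).getD 0
  | none => 0

def count_together (lista : List String) (a_length : Int) (k : Int) : List Int :=
  lista.foldl
    (fun number_list numbers =>
      -- state (number, add, p); a_length**p with p ≥ 0 throughout the loop, so ^ p.toNat is exact
      let st := (PySem.List.pyRange 0 k 1).foldl
        (fun (st : Int × Int × Int) i =>
          let add := pyIntAt numbers (i * 2) * 10 + pyIntAt numbers (i * 2 + 1)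
          (st.1 + add * a_length ^ st.2.2.toNat, add, st.2.2 - 1))
        (0, 0, k - 1)
      number_list ++ [st.1])
    []

-- ===== PORT B =====
def horner (s : String) (a_length : Int) (k : Int) : Int :=
  (PySem.List.pyRange 0 k 1).foldl
    (fun number i => number * a_length + pyIntAt s (2 * i) * 10 + pyIntAt s (2 * i + 1))
    0

def count_together_alt (lista : List String) (a_length : Int) (k : Int) : List Int :=
  lista.map (fun s => horner s a_length k)

-- ===== PRECONDITION & SPEC =====
-- Pre_: every string has at least 2*k characters and its first 2*k characters are decimal
-- digits — exactly the inputs where A's int(numbers[...]) neither IndexErrors nor ValueErrors.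
def Pre_count_together (lista : List String) (a_length : Int) (k : Int) : Prop :=
  lista.all (fun s =>
    decide (2 * k ≤ (s.toList.length : Int)) &&
    (s.toList.take (2 * k).toNat).all PySem.Chars.isdigit) = true

instance (lista : List String) (a_length : Int) (k : Int) : Decidable (Pre_count_together lista a_length k) := by
  unfold Pre_count_together; infer_instance

def pvWitness_count_together : List String × Int × Int := (["1234", "0907"], 5, 2)

def Spec_count_together (lista : List String) (a_length : Int) (k : Int) (out : List Int) : Prop := out = count_together_alt lista a_length k
instance (lista : List String) (a_length : Int) (k : Int) (out : List Int) : Decidable (Spec_count_together lista a_length k out) := by unfold Spec_count_together; infer_instance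

-- ===== CLAIM (what is proved, stated in full; the proofs are below) =====
def Claim_equal_count_together : Prop := ∀ (lista : List String) (a_length : Int) (k : Int), Dom_count_together lista a_length k → Pre_count_together lista a_length k → Spec_count_together lista a_length k (count_together lista a_length k)

-- ===== LEMMAS AND PROOFS =====

-- A's inner loop over range n, abstracted over the pair values v : invariant linking the
-- power-accumulation state to the Horner value H n = foldl of B over the same range.
theorem inner_inv (w : Nat → Int) (a k : Int) (n : Nat) :
    (n : Int) ≤ k →
    ∃ ad : Int,
      (List.range n).foldl
        (fun (st : Int × Int × Int) i => (st.1 + w i * a ^ st.2.2.toNat, w i, st.2.2 - 1))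
        (0, 0, k - 1)
      = ((List.range n).foldl (fun x i => x * a + w i) 0 * a ^ (k - n).toNat,
         ad, k - 1 - n) := by
  induction n with
  | zero => exact fun _ => ⟨0, by simp⟩
  | succ m ih =>
    intro hn
    have hm : (m : Int) + 1 ≤ k := by push_cast at hn; omega
    obtain ⟨ad, hA⟩ := ih (by omega)
    refine ⟨w m, ?_⟩
    rw [List.range_succ]
    simp only [List.foldl_append, hA, List.foldl_cons, List.foldl_nil]
    have h1 : (k - (m : Int)).toNat = (k - ((m : Int) + 1)).toNat + 1 := by omega
    have h2 : (k - 1 - (m : Int)).toNat = (k - ((m : Int) + 1)).toNat := by omega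
    refine Prod.ext ?_ (Prod.ext rfl (by push_cast; ring))
    simp only [h1, h2, pow_succ]
    push_cast
    ring

theorem inner_eq (v : Int → Int) (a k : Int) :
    ((PySem.List.pyRange 0 k 1).foldl
        (fun (st : Int × Int × Int) i => (st.1 + v i * a ^ st.2.2.toNat, v i, st.2.2 - 1))
        (0, 0, k - 1)).1
      = (PySem.List.pyRange 0 k 1).foldl (fun x i => x * a + v i) 0 := by
  rw [PySem.List.pyRange_one, List.foldl_map, List.foldl_map]
  simp only [zero_add, sub_zero]
  by_cases hk : k ≤ 0
  · have hz : k.toNat = 0 := by omega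
    simp [hz]
  · obtain ⟨ad, h⟩ := inner_inv (fun j => v (j : Int)) a k k.toNat (by omega)
    have h0 : (k - (k.toNat : Int)).toNat = 0 := by omega
    rw [h, h0]
    simp

-- ===== VERDICT (by name: the statement is the Claim_ definition above) =====
theorem count_together_spec : Claim_equal_count_together := by
  intro lista a_length k _ _
  unfold Spec_count_together count_together count_together_alt
  rw [PySem.List.foldl_append_singleton_eq_map, List.nil_append]
  refine List.map_congr_left (fun s _ => ?_)
  unfold horner
  have := inner_eq (fun i => pyIntAt s (i * 2) * 10 + pyIntAt s (i * 2 + 1)) a_length k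
  simp only at this ⊢
  rw [this]
  have hf : (fun (x i : Int) => x * a_length + (pyIntAt s (i * 2) * 10 + pyIntAt s (i * 2 + 1)))
      = (fun (x i : Int) => x * a_length + pyIntAt s (2 * i) * 10 + pyIntAt s (2 * i + 1)) := by
    funext x i
    rw [show i * 2 = 2 * i from mul_comm i 2]
    ring
  rw [hf]
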